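-- pv_equiv track=rewrite | github.com/cloudlicky/Bolt-Project-M | streamlit_app/app.py | get_strongest_signal
-- ===== SOURCE A (Python) =====
-- def get_strongest_signal(signals):
--     """Get the strongest trading signal from all available signals"""
--     if not signals:
--         return None
--
--     signal_priorities = {'BUY': 3, 'SELL': 2, 'HOLD': 1}
--     strongest = None
--     max_priority = 0
--
--     for signal_type, signal in signals.items():
--         priority = signal_priorities.get(signal.get('action', 'HOLD'), 0)
--         if priority > max_priority:
--             max_priority = priority
--             strongest = signal
--
--     return strongest
-- ===== SOURCE B (Python) =====
-- def get_strongest_signal(signals):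
--     """Get the strongest trading signal from all available signals"""
--     if not signals:
--         return None
--     for action in ('BUY', 'SELL', 'HOLD'):
--         for sig in signals.values():
--             if sig.get('action', 'HOLD') == action:
--                 return sig
--     return None
-- ===== Notes on version B (the rewrite author's own statement) =====
-- stated objective: simpler
-- what changed: Replaced the single max-priority-tracking fold with a priority-ordered search: for each action in descending priority, return the first signal with that action; no priority dict or running max needed.
import Mathlib
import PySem

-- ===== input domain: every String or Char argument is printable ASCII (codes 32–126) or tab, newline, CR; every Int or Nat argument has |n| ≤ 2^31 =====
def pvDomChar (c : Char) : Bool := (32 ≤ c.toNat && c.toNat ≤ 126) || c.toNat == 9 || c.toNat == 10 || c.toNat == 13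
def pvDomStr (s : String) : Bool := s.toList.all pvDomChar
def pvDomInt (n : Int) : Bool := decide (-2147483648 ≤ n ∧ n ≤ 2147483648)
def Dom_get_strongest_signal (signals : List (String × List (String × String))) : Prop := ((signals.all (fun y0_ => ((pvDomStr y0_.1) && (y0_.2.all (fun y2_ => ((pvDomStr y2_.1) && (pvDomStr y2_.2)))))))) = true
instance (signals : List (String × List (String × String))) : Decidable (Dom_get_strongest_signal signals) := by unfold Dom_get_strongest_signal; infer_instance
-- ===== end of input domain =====

-- B replaces A's max-priority-tracking fold by a priority-ordered first-match search (simpler; same cost).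

-- ===== PORT A =====
-- signal.get('action', 'HOLD')  (inner dict lookup, first match)
def pvAct (sig : List (String × String)) : String :=
  PySem.Dict.getD (PySem.Dict.mk sig) "action" "HOLD"

-- signal_priorities = {'BUY': 3, 'SELL': 2, 'HOLD': 1}
def pvPrios : PySem.Dict String Int :=
  PySem.Dict.ofList [("BUY", 3), ("SELL", 2), ("HOLD", 1)]

-- the loop body of A
def pvStep (st : Option (List (String × String)) × Int) (kv : String × List (String × String)) :
    Option (List (String × String)) × Int :=
  let priority := pvPrios.getD (pvAct kv.2) 0
  if priority > st.2 then (some kv.2, priority) else st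

def get_strongest_signal (signals : List (String × List (String × String))) : Option (List (String × String)) :=
  if signals = [] then none
  else (signals.foldl pvStep (none, 0)).1

-- ===== PORT B =====
-- inner loop of B: first signal whose action equals `action`
def pvFindByAction (signals : List (String × List (String × String))) (action : String) :
    Option (List (String × String)) :=
  (signals.find? (fun kv => pvAct kv.2 == action)).map (·.2)

-- outer loop of B over the descending-priority action tuple
def pvScanActions (actions : List String) (signals : List (String × List (String × String))) :
    Option (List (String × String)) :=
  match actions with
  | [] => none
  | a :: rest =>
    match pvFindByAction signals a with
    | some s => some s
    | none => pvScanActions rest signals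

def get_strongest_signal_alt (signals : List (String × List (String × String))) : Option (List (String × String)) :=
  if signals = [] then none
  else pvScanActions ["BUY", "SELL", "HOLD"] signals

-- ===== PRECONDITION & SPEC =====
def Spec_get_strongest_signal (signals : List (String × List (String × String))) (out : Option (List (String × String))) : Prop := out = get_strongest_signal_alt signals
instance (signals : List (String × List (String × String))) (out : Option (List (String × String))) : Decidable (Spec_get_strongest_signal signals out) := by unfold Spec_get_strongest_signal; infer_instance

-- ===== CLAIM (what is proved, stated in full; the proofs are below) =====
def Claim_equal_get_strongest_signal : Prop := ∀ (signals : List (String × List (String × String))), Dom_get_strongest_signal signals → Spec_get_strongest_signal signals (get_strongest_signal signals)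

-- ===== LEMMAS AND PROOFS =====

-- priority of an action string, as an if-chain
theorem prios_getD (a : String) :
    pvPrios.getD a 0 =
      if a = "BUY" then 3 else if a = "SELL" then 2 else if a = "HOLD" then 1 else 0 := by
  have h : pvPrios = PySem.Dict.mk [("BUY", 3), ("SELL", 2), ("HOLD", 1)] := by rfl
  rw [h, PySem.Dict.getD_eq_get?_getD]
  simp only [PySem.Dict.get?_mk_cons, beq_iff_eq]
  by_cases h1 : "BUY" = a <;> by_cases h2 : "SELL" = a <;> by_cases h3 : "HOLD" = a <;>
    simp [h1, h2, h3, PySem.Dict.get?] <;>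
    first
      | (intro hh; exact h1 hh.symm)
      | (split_ifs <;> simp_all)

theorem prios_le_three (a : String) : pvPrios.getD a 0 ≤ 3 := by
  rw [prios_getD]; split_ifs <;> norm_num

theorem prios_le_two (a : String) (h : a ≠ "BUY") : pvPrios.getD a 0 ≤ 2 := by
  rw [prios_getD]; split_ifs <;> simp_all

theorem prios_le_one (a : String) (h : a ≠ "BUY") (h' : a ≠ "SELL") : pvPrios.getD a 0 ≤ 1 := by
  rw [prios_getD]; split_ifs <;> simp_all

theorem prios_le_zero (a : String) (h : a ≠ "BUY") (h' : a ≠ "SELL") (h'' : a ≠ "HOLD") :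
    pvPrios.getD a 0 ≤ 0 := by
  rw [prios_getD]; split_ifs <;> simp_all

-- only one action string attains each positive priority value
theorem prios_inj (a : String) (M : Int) (hM : M = 1 ∨ M = 2 ∨ M = 3)
    (A' : String) (hA : pvPrios.getD A' 0 = M) (h : pvPrios.getD a 0 = M) : a = A' := by
  rw [prios_getD] at hA h
  rcases hM with h1 | h1 | h1 <;> subst h1 <;>
    (split_ifs at hA h <;> simp_all)

-- the fold's state is fixed once the running max dominates all remaining priorities
theorem foldl_step_fix (l : List (String × List (String × String)))
    (st : Option (List (String × String)) × Int)
    (h : ∀ kv ∈ l, pvPrios.getD (pvAct kv.2) 0 ≤ st.2) : l.foldl pvStep st = st := by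
  induction l with
  | nil => rfl
  | cons kv rest ih =>
    have h0 := h kv (List.mem_cons_self ..)
    have : pvStep st kv = st := by
      simp only [pvStep]
      rw [if_neg (by omega)]
    rw [List.foldl_cons, this]
    exact ih fun x hx => h x (List.mem_cons_of_mem _ hx)

-- A's fold returns the first element whose action attains the overall maximum priority M
theorem foldl_step_top (M : Int) (A' : String) (hA : pvPrios.getD A' 0 = M)
    (hM : M = 1 ∨ M = 2 ∨ M = 3)
    (l : List (String × List (String × String))) :
    ∀ st : Option (List (String × String)) × Int, st.2 < M →
    (∀ kv ∈ l, pvPrios.getD (pvAct kv.2) 0 ≤ M) →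
    (∃ kv ∈ l, pvAct kv.2 = A') →
    (l.foldl pvStep st).1 = (l.find? (fun kv => pvAct kv.2 == A')).map (·.2) := by
  induction l with
  | nil => rintro st _ _ ⟨kv, h, _⟩; exact absurd h (List.not_mem_nil)
  | cons kv rest ih =>
    intro st hst hle hex
    by_cases hk : pvAct kv.2 = A'
    · have hstep : pvStep st kv = (some kv.2, M) := by
        simp only [pvStep, hk, hA]
        rw [if_pos (by omega)]
      rw [List.foldl_cons, hstep,
        foldl_step_fix rest (some kv.2, M) (fun x hx => hle x (List.mem_cons_of_mem _ hx))]
      rw [List.find?_cons_of_pos (by simp [hk])]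
      rfl
    · have hne : pvPrios.getD (pvAct kv.2) 0 ≠ M := fun h => hk (prios_inj _ M hM A' hA h)
      have hlt : pvPrios.getD (pvAct kv.2) 0 < M :=
        lt_of_le_of_ne (hle kv (List.mem_cons_self ..)) hne
      have hst' : (pvStep st kv).2 < M := by
        simp only [pvStep]
        split <;> simpa using by omega
      rw [List.foldl_cons, List.find?_cons_of_neg (by simp [hk])]
      refine ih (pvStep st kv) hst' (fun x hx => hle x (List.mem_cons_of_mem _ hx)) ?_
      rcases hex with ⟨x, hx, hxa⟩
      rcases List.mem_cons.mp hx with rfl | hx'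
      · exact absurd hxa hk
      · exact ⟨x, hx', hxa⟩

-- ===== VERDICT (by name: the statement is the Claim_ definition above) =====
theorem get_strongest_signal_spec : Claim_equal_get_strongest_signal := by
  intro signals _
  unfold Spec_get_strongest_signal get_strongest_signal get_strongest_signal_alt
  by_cases hnil : signals = []
  · simp [hnil]
  rw [if_neg hnil, if_neg hnil]
  by_cases h3 : ∃ kv ∈ signals, pvAct kv.2 = "BUY"
  · have hs : (signals.find? (fun kv => pvAct kv.2 == "BUY")).isSome := by
      rcases h3 with ⟨kv, hm, ha⟩
      exact List.find?_isSome.mpr ⟨kv, hm, by simp [ha]⟩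
    rcases Option.isSome_iff_exists.mp hs with ⟨v, hv⟩
    rw [foldl_step_top 3 "BUY" (by decide) (by tauto) signals (none, 0) (by norm_num)
      (fun kv _ => prios_le_three _) h3]
    simp [pvScanActions, pvFindByAction, hv]
  · have hno3 : ∀ kv ∈ signals, pvAct kv.2 ≠ "BUY" := by push Not at h3; exact h3
    have hB : signals.find? (fun kv => pvAct kv.2 == "BUY") = none :=
      List.find?_eq_none.mpr (by simpa using hno3)
    by_cases h2 : ∃ kv ∈ signals, pvAct kv.2 = "SELL"
    · have hs : (signals.find? (fun kv => pvAct kv.2 == "SELL")).isSome := by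
        rcases h2 with ⟨kv, hm, ha⟩
        exact List.find?_isSome.mpr ⟨kv, hm, by simp [ha]⟩
      rcases Option.isSome_iff_exists.mp hs with ⟨v, hv⟩
      rw [foldl_step_top 2 "SELL" (by decide) (by tauto) signals (none, 0) (by norm_num)
        (fun kv hm => prios_le_two _ (hno3 kv hm)) h2]
      simp [pvScanActions, pvFindByAction, hv, hB]
    · have hno2 : ∀ kv ∈ signals, pvAct kv.2 ≠ "SELL" := by push Not at h2; exact h2
      have hS : signals.find? (fun kv => pvAct kv.2 == "SELL") = none :=
        List.find?_eq_none.mpr (by simpa using hno2)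
      by_cases h1 : ∃ kv ∈ signals, pvAct kv.2 = "HOLD"
      · have hs : (signals.find? (fun kv => pvAct kv.2 == "HOLD")).isSome := by
          rcases h1 with ⟨kv, hm, ha⟩
          exact List.find?_isSome.mpr ⟨kv, hm, by simp [ha]⟩
        rcases Option.isSome_iff_exists.mp hs with ⟨v, hv⟩
        rw [foldl_step_top 1 "HOLD" (by decide) (by tauto) signals (none, 0) (by norm_num)
          (fun kv hm => prios_le_one _ (hno3 kv hm) (hno2 kv hm)) h1]
        simp [pvScanActions, pvFindByAction, hv, hB, hS]
      · have hno1 : ∀ kv ∈ signals, pvAct kv.2 ≠ "HOLD" := by push Not at h1; exact h1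
        have hH : signals.find? (fun kv => pvAct kv.2 == "HOLD") = none :=
          List.find?_eq_none.mpr (by simpa using hno1)
        rw [foldl_step_fix signals (none, 0)
          (fun kv hm => prios_le_zero _ (hno3 kv hm) (hno2 kv hm) (hno1 kv hm))]
        simp [pvScanActions, pvFindByAction, hB, hS, hH]
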